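-- pv_equiv track=rewrite | github.com/prasanna31/Data-structures-and-Algorithms | Arrays.py | max_len_subarray_sum_k
-- ===== SOURCE A (Python) =====
-- def max_len_subarray_sum_k(nums, k):
--     # Returns max length of subarray with sum == k
--     d = {0: -1}
--     curr = res = 0
--     for i, num in enumerate(nums):
--         curr += num
--         if curr - k in d:
--             res = max(res, i - d[curr - k])
--         if curr not in d:
--             d[curr] = i
--     return res
-- ===== SOURCE B (Python) =====
-- def max_len_subarray_sum_k(nums, k):
--     # Brute force over suffixes: for each suffix, scan its prefixes with a
--     # running sum, keeping the best length seen so far. No dictionary.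
--     best = 0
--     suffix = nums
--     while suffix:
--         total = 0
--         length = 0
--         for x in suffix:
--             total += x
--             length += 1
--             if total == k:
--                 best = max(best, length)
--         suffix = suffix[1:]
--     return best
-- ===== Notes on version B (the rewrite author's own statement) =====
-- stated objective: alternative
-- what changed: Replaced A's single pass with a first-occurrence prefix-sum dictionary by a dictionary-free recursion over suffixes that scans each suffix's prefixes with a running sum, keeping the best length.
import Mathlib
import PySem

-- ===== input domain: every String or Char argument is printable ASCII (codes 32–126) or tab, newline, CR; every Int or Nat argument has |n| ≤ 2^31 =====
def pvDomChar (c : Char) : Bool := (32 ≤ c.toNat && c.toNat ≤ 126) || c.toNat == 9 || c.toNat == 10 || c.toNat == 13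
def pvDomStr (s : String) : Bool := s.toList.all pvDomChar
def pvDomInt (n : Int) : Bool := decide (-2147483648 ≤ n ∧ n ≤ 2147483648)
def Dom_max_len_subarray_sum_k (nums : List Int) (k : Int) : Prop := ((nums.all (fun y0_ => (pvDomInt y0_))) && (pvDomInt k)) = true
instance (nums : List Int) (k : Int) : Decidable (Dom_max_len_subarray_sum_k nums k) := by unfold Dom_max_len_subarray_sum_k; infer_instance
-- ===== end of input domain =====

-- B replaces A's first-occurrence prefix-sum dictionary by a recursion over suffixes
-- with a running-sum scan of each suffix's prefixes (alternative decomposition, O(n^2)).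

-- ===== PORT A =====
-- the for-loop of A: state (curr, res, d), i is the enumerate counter
def maxLenAGo (k : Int) : List Int → Int → Int → PySem.Dict Int Int → Int → Int
  | [], _, res, _, _ => res
  | num :: rest, curr, res, d, i =>
    let curr := curr + num
    let res := match d.get? (curr - k) with
      | some v => max res (i - v)
      | none => res
    let d := if (d.get? curr).isSome then d else d.insert curr i
    maxLenAGo k rest curr res d (i + 1)

def max_len_subarray_sum_k (nums : List Int) (k : Int) : Int :=
  maxLenAGo k nums 0 0 (PySem.Dict.insert PySem.Dict.empty 0 (-1)) 0

-- ===== PORT B =====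
-- the for-loop of B: state (total, length, best)
def maxLenInner (k : Int) : List Int → Int → Int → Int → Int
  | [], _, _, best => best
  | x :: rest, total, length, best =>
    let total := total + x
    let length := length + 1
    let best := if total = k then max best length else best
    maxLenInner k rest total length best

-- the while-loop of B over successive suffixes, accumulating best
def maxLenOuter (k : Int) : List Int → Int → Int
  | [], best => best
  | x :: rest, best => maxLenOuter k rest (maxLenInner k (x :: rest) 0 0 best)

def max_len_subarray_sum_k_alt (nums : List Int) (k : Int) : Int :=
  maxLenOuter k nums 0

-- ===== PRECONDITION & SPEC =====
def Spec_max_len_subarray_sum_k (nums : List Int) (k : Int) (out : Int) : Prop := out = max_len_subarray_sum_k_alt nums k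
instance (nums : List Int) (k : Int) (out : Int) : Decidable (Spec_max_len_subarray_sum_k nums k out) := by unfold Spec_max_len_subarray_sum_k; infer_instance

-- ===== CLAIM (what is proved, stated in full; the proofs are below) =====
def Claim_equal_max_len_subarray_sum_k : Prop := ∀ (nums : List Int) (k : Int), Dom_max_len_subarray_sum_k nums k → Spec_max_len_subarray_sum_k nums k (max_len_subarray_sum_k nums k)

-- ===== LEMMAS AND PROOFS =====

-- sum of the first t elements
def prefSum (xs : List Int) (t : ℕ) : Int := (xs.take t).sum

-- "r is the max of 0 and all lengths b - t of windows (t, b] of xs whose sum is k"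
def GoodLen (xs : List Int) (k r : Int) : Prop :=
  0 ≤ r ∧
  (r = 0 ∨ ∃ t b : ℕ, t < b ∧ b ≤ xs.length ∧ prefSum xs b - prefSum xs t = k ∧ r = (b : Int) - t) ∧
  (∀ t b : ℕ, t < b → b ≤ xs.length → prefSum xs b - prefSum xs t = k → (b : Int) - (t : Int) ≤ r)

theorem goodLen_unique {xs : List Int} {k r₁ r₂ : Int}
    (h₁ : GoodLen xs k r₁) (h₂ : GoodLen xs k r₂) : r₁ = r₂ := by
  obtain ⟨n₁, a₁, b₁⟩ := h₁
  obtain ⟨n₂, a₂, b₂⟩ := h₂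
  apply le_antisymm
  · rcases a₁ with h | ⟨t, b, ht, hb, hs, hr⟩
    · omega
    · have := b₂ t b ht hb hs; omega
  · rcases a₂ with h | ⟨t, b, ht, hb, hs, hr⟩
    · omega
    · have := b₁ t b ht hb hs; omega

theorem prefSum_nil (t : ℕ) : prefSum [] t = 0 := by simp [prefSum]

theorem prefSum_cons (x : Int) (xs : List Int) (t : ℕ) :
    prefSum (x :: xs) (t + 1) = x + prefSum xs t := by simp [prefSum]

theorem prefSum_append_le (pre : List Int) (num : Int) (t : ℕ) (h : t ≤ pre.length) :
    prefSum (pre ++ [num]) t = prefSum pre t := by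
  simp [prefSum, List.take_append_of_le_length h]

theorem prefSum_append_last (pre : List Int) (num : Int) :
    prefSum (pre ++ [num]) (pre.length + 1) = pre.sum + num := by
  simp [prefSum]

-- ===== B-side =====

theorem maxLenInner_spec (k : Int) (rest : List Int) :
    ∀ (total length best : Int),
    best ≤ maxLenInner k rest total length best ∧
    (maxLenInner k rest total length best = best ∨
      ∃ m : ℕ, m < rest.length ∧ total + (rest.take (m + 1)).sum = k ∧
        maxLenInner k rest total length best = length + ((m : Int) + 1)) ∧
    (∀ m : ℕ, m < rest.length → total + (rest.take (m + 1)).sum = k →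
      length + ((m : Int) + 1) ≤ maxLenInner k rest total length best) := by
  induction rest with
  | nil => intro total length best; refine ⟨le_refl _, Or.inl rfl, ?_⟩; intro m hm; simp at hm
  | cons x rest' ih =>
    intro total length best
    simp only [maxLenInner]
    by_cases hk : total + x = k
    · simp only [if_pos hk]
      obtain ⟨ihle, ihatt, ihbd⟩ := ih (total + x) (length + 1) (max best (length + 1))
      refine ⟨by omega, ?_, ?_⟩
      · rcases ihatt with h | ⟨m, hm, hs, hr⟩
        · by_cases hbl : length + 1 ≤ best
          · left; rw [h]; omega
          · right; exact ⟨0, by simp, by simpa using hk, by rw [h]; omega⟩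
        · right
          refine ⟨m + 1, by simpa using hm, by simpa [add_assoc] using hs, ?_⟩
          rw [hr]; push_cast; ring
      · intro m hm hs
        match m with
        | 0 => push_cast; omega
        | Nat.succ m' =>
          have := ihbd m' (by simpa using hm) (by simpa [add_assoc] using hs)
          push_cast at this ⊢; omega
    · simp only [if_neg hk]
      obtain ⟨ihle, ihatt, ihbd⟩ := ih (total + x) (length + 1) best
      refine ⟨ihle, ?_, ?_⟩
      · rcases ihatt with h | ⟨m, hm, hs, hr⟩
        · left; exact h
        · right
          refine ⟨m + 1, by simpa using hm, by simpa [add_assoc] using hs, ?_⟩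
          rw [hr]; push_cast; ring
      · intro m hm hs
        match m with
        | 0 => exact absurd (by simpa using hs) hk
        | Nat.succ m' =>
          have := ihbd m' (by simpa using hm) (by simpa [add_assoc] using hs)
          push_cast at this ⊢; omega

theorem maxLenOuter_spec (k : Int) :
    ∀ (xs : List Int) (best : Int),
    best ≤ maxLenOuter k xs best ∧
    (maxLenOuter k xs best = best ∨
      ∃ t b : ℕ, t < b ∧ b ≤ xs.length ∧ prefSum xs b - prefSum xs t = k ∧
        maxLenOuter k xs best = (b : Int) - t) ∧
    (∀ t b : ℕ, t < b → b ≤ xs.length → prefSum xs b - prefSum xs t = k →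
      (b : Int) - (t : Int) ≤ maxLenOuter k xs best) := by
  intro xs
  induction xs with
  | nil =>
    intro best
    refine ⟨le_refl _, Or.inl rfl, ?_⟩
    intro t b ht hb; simp at hb; omega
  | cons x rest ih =>
    intro best
    simp only [maxLenOuter]
    obtain ⟨inle, inatt, inbd⟩ := maxLenInner_spec k (x :: rest) 0 0 best
    obtain ⟨ole, oatt, obd⟩ := ih (maxLenInner k (x :: rest) 0 0 best)
    refine ⟨by omega, ?_, ?_⟩
    · rcases oatt with h | ⟨t, b, ht, hb, hs, hr⟩
      · rw [h]
        rcases inatt with h2 | ⟨m, hm, hs2, hr2⟩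
        · left; exact h2
        · right
          refine ⟨0, m + 1, by omega, by simpa using hm, ?_, by rw [hr2]; push_cast; omega⟩
          simpa [prefSum] using hs2
      · right
        refine ⟨t + 1, b + 1, by omega, by simpa using hb, ?_, by rw [hr]; push_cast; omega⟩
        rw [prefSum_cons, prefSum_cons]; omega
    · intro t b ht hb hs
      match t with
      | 0 =>
        obtain ⟨m, rfl⟩ : ∃ m, b = m + 1 := ⟨b - 1, by omega⟩
        have := inbd m (by simpa using hb) (by simpa [prefSum] using hs)
        push_cast at this ⊢; omega
      | Nat.succ t' =>
        obtain ⟨b', rfl⟩ : ∃ b', b = b' + 1 := ⟨b - 1, by omega⟩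
        have hs' : prefSum rest b' - prefSum rest t' = k := by
          rw [prefSum_cons, prefSum_cons] at hs; omega
        have := obd t' b' (by omega) (by simpa using hb) hs'
        push_cast at this ⊢; omega

theorem alt_good (xs : List Int) (k : Int) : GoodLen xs k (max_len_subarray_sum_k_alt xs k) := by
  obtain ⟨hle, hatt, hbd⟩ := maxLenOuter_spec k xs 0
  exact ⟨by unfold max_len_subarray_sum_k_alt; omega,
    by unfold max_len_subarray_sum_k_alt; exact hatt,
    by unfold max_len_subarray_sum_k_alt; exact hbd⟩

-- ===== A-side =====

-- index of the first prefix of xs whose sum is v (including the empty prefix)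
def firstIdx (xs : List Int) (v : Int) : Option ℕ :=
  (List.range (xs.length + 1)).find? (fun t => decide (prefSum xs t = v))

-- d maps each prefix-sum value v to (first index with that prefix sum) - 1
def DictInv (xs : List Int) (d : PySem.Dict Int Int) : Prop :=
  ∀ v : Int, d.get? v = (firstIdx xs v).map (fun t : ℕ => (t : Int) - 1)

theorem firstIdx_some {xs : List Int} {v : Int} {t : ℕ} (h : firstIdx xs v = some t) :
    t ≤ xs.length ∧ prefSum xs t = v ∧ ∀ s < t, prefSum xs s ≠ v := by
  unfold firstIdx at h
  rw [List.find?_eq_some_iff_getElem] at h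
  obtain ⟨hp, i, hi, hget, hmin⟩ := h
  simp only [List.getElem_range] at hget
  subst hget
  simp only [List.length_range] at hi
  refine ⟨by omega, by simpa using hp, ?_⟩
  intro s hs
  have := hmin s hs
  simpa using this

theorem firstIdx_none {xs : List Int} {v : Int} (h : firstIdx xs v = none) :
    ∀ t ≤ xs.length, prefSum xs t ≠ v := by
  unfold firstIdx at h
  rw [List.find?_eq_none] at h
  intro t ht
  have := h t (by rw [List.mem_range]; omega)
  simpa using this

theorem find?_congr_mem {α : Type} (l : List α) (p q : α → Bool)
    (h : ∀ x ∈ l, p x = q x) : l.find? p = l.find? q := by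
  induction l with
  | nil => rfl
  | cons a l ih =>
    simp only [List.find?_cons]
    rw [h a (by simp)]
    cases q a
    · exact ih (fun x hx => h x (by simp [hx]))
    · rfl

theorem firstIdx_append (pre : List Int) (num : Int) (v : Int) :
    firstIdx (pre ++ [num]) v =
      (firstIdx pre v).or (if pre.sum + num = v then some (pre.length + 1) else none) := by
  unfold firstIdx
  have hlen : (pre ++ [num]).length + 1 = (pre.length + 1) + 1 := by simp
  rw [hlen, List.range_succ, List.find?_append]
  congr 1
  · apply find?_congr_mem
    intro t ht
    rw [List.mem_range] at ht
    rw [prefSum_append_le pre num t (by omega)]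
  · simp only [List.find?_cons, List.find?_nil]
    rw [prefSum_append_last]
    by_cases h : pre.sum + num = v <;> simp [h]

theorem maxLenAGo_spec (k : Int) :
    ∀ (rest pre : List Int) (res : Int) (d : PySem.Dict Int Int),
    DictInv pre d → GoodLen pre k res →
    GoodLen (pre ++ rest) k (maxLenAGo k rest pre.sum res d (pre.length : Int)) := by
  intro rest
  induction rest with
  | nil => intro pre res d _ hres; simpa using hres
  | cons num rest' ih =>
    intro pre res d hd hres
    simp only [maxLenAGo]
    have hkey : pre ++ num :: rest' = (pre ++ [num]) ++ rest' := by simp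
    rw [hkey]
    -- show the new state satisfies the invariants for pre' = pre ++ [num]
    set pre' := pre ++ [num] with hpre'
    have hsum : pre'.sum = pre.sum + num := by simp [hpre']
    have hlen : ((pre'.length : Int)) = (pre.length : Int) + 1 := by simp [hpre']
    have hcurr : prefSum pre' (pre.length + 1) = pre.sum + num := prefSum_append_last pre num
    -- new res
    set res' := (match d.get? (pre.sum + num - k) with
      | some v => max res ((pre.length : Int) - v)
      | none => res) with hres'
    -- new dict
    set d' := (if (d.get? (pre.sum + num)).isSome then d else d.insert (pre.sum + num) (pre.length : Int)) with hd'
    have hgood' : GoodLen pre' k res' := by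
      obtain ⟨hn, hatt, hbd⟩ := hres
      have hdk := hd (pre.sum + num - k)
      -- carry old pairs to pre'
      have hold : ∀ t b : ℕ, t < b → b ≤ pre.length →
          (prefSum pre' b - prefSum pre' t = k ↔ prefSum pre b - prefSum pre t = k) := by
        intro t b ht hb
        rw [prefSum_append_le pre num b hb, prefSum_append_le pre num t (by omega)]
      cases hfi : firstIdx pre (pre.sum + num - k) with
      | none =>
        rw [hfi] at hdk; simp only [Option.map_none] at hdk
        have hres'eq : res' = res := by rw [hres', hdk]
        rw [hres'eq]
        refine ⟨hn, ?_, ?_⟩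
        · rcases hatt with h | ⟨t, b, ht, hb, hs, hr⟩
          · left; exact h
          · right; exact ⟨t, b, ht, by simp [hpre']; omega, (hold t b ht hb).mpr hs, hr⟩
        · intro t b ht hb hs
          by_cases hble : b ≤ pre.length
          · exact hbd t b ht hble ((hold t b ht hble).mp hs)
          · have hbeq : b = pre.length + 1 := by simp [hpre'] at hb; omega
            subst hbeq
            rw [hcurr, prefSum_append_le pre num t (by omega)] at hs
            exact absurd (by omega : prefSum pre t = pre.sum + num - k)
              (firstIdx_none hfi t (by omega))
      | some t =>
        rw [hfi] at hdk; simp only [Option.map_some] at hdk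
        obtain ⟨htle, hts, htmin⟩ := firstIdx_some hfi
        have hres'eq : res' = max res ((pre.length : Int) - ((t : Int) - 1)) := by
          rw [hres', hdk]
        rw [hres'eq]
        refine ⟨by omega, ?_, ?_⟩
        · by_cases hc : res ≥ (pre.length : Int) - ((t : Int) - 1)
          · rw [max_eq_left hc]
            rcases hatt with h | ⟨t', b', ht', hb', hs', hr'⟩
            · left; exact h
            · right; exact ⟨t', b', ht', by simp [hpre']; omega, (hold t' b' ht' hb').mpr hs', hr'⟩
          · rw [max_eq_right (by omega)]
            right
            refine ⟨t, pre.length + 1, by omega, by simp [hpre'], ?_, by push_cast; omega⟩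
            rw [hcurr, prefSum_append_le pre num t htle]; omega
        · intro t' b ht' hb hs
          by_cases hble : b ≤ pre.length
          · have := hbd t' b ht' hble ((hold t' b ht' hble).mp hs)
            omega
          · have hbeq : b = pre.length + 1 := by simp [hpre'] at hb; omega
            subst hbeq
            rw [hcurr, prefSum_append_le pre num t' (by omega)] at hs
            have htle' : t ≤ t' := by
              by_contra hlt
              exact htmin t' (by omega) (by omega)
            push_cast; omega
    have hdict' : DictInv pre' d' := by
      intro v
      rw [firstIdx_append]
      cases hcontains : (d.get? (pre.sum + num)).isSome with
      | true =>
        have hd'eq : d' = d := by rw [hd', if_pos hcontains]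
        rw [hd'eq, hd v]
        cases hfi : firstIdx pre v with
        | some t => simp
        | none =>
          simp only [Option.map_none, Option.none_or]
          by_cases hv : pre.sum + num = v
          · exfalso
            have h2 := hd v
            rw [hfi] at h2
            simp only [Option.map_none] at h2
            rw [hv] at hcontains
            rw [h2] at hcontains
            simp at hcontains
          · simp [hv]
      | false =>
        have hd'eq : d' = d.insert (pre.sum + num) (pre.length : Int) := by
          rw [hd', if_neg (by simp [hcontains])]
        have hfinone : firstIdx pre (pre.sum + num) = none := by
          have := hd (pre.sum + num)
          cases hfi : firstIdx pre (pre.sum + num) with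
          | none => rfl
          | some t =>
            rw [hfi] at this; simp only [Option.map_some] at this
            rw [this] at hcontains; simp at hcontains
        rw [hd'eq, PySem.Dict.get?_insert]
        by_cases hv : v = pre.sum + num
        · subst hv
          rw [hfinone]
          simp
        · rw [if_neg hv, hd v]
          cases hfi : firstIdx pre v with
          | some t => simp
          | none =>
            simp only [Option.map_none, Option.none_or]
            rw [if_neg (by omega : ¬ pre.sum + num = v)]
            simp
    have := ih pre' res' d' hdict' hgood'
    rw [hsum, hlen] at this
    exact this

theorem a_good (nums : List Int) (k : Int) :
    GoodLen nums k (max_len_subarray_sum_k nums k) := by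
  unfold max_len_subarray_sum_k
  have h := maxLenAGo_spec k nums [] 0 (PySem.Dict.insert PySem.Dict.empty 0 (-1)) ?_ ?_
  · simpa using h
  · intro v
    rw [PySem.Dict.get?_insert]
    unfold firstIdx
    simp only [List.length_nil, List.range_succ, List.range_zero, List.nil_append,
      List.find?_cons, List.find?_nil]
    by_cases hv : v = 0
    · subst hv; simp [prefSum_nil]
    · rw [if_neg hv]
      have : prefSum [] 0 ≠ v := by rw [prefSum_nil]; omega
      simp [this, PySem.Dict.get?, PySem.Dict.empty]
  · refine ⟨le_refl _, Or.inl rfl, ?_⟩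
    intro t b ht hb; simp at hb; omega

-- ===== VERDICT (by name: the statement is the Claim_ definition above) =====
theorem max_len_subarray_sum_k_spec : Claim_equal_max_len_subarray_sum_k := by
  intro nums k _
  unfold Spec_max_len_subarray_sum_k
  exact goodLen_unique (a_good nums k) (alt_good nums k)
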